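-- pv_equiv track=rewrite | github.com/gbutrykowska/Python-exercises | Zadanie8.1.py | get_right_score
-- ===== SOURCE A (Python) =====
-- def get_right_score(contest_list):
--     right_score = 0
--     for letter in contest_list:
--         if letter == "m":
--             right_score += 4
--         if letter == "q":
--             right_score += 3
--         if letter == "d":
--             right_score += 2
--         if letter == "z":
--             right_score += 1
--     return right_score
-- ===== SOURCE B (Python) =====
-- SCORES = (("m", 4), ("q", 3), ("d", 2), ("z", 1))
--
-- def get_right_score(contest_list):
--     return sum(weight * contest_list.count(letter) for letter, weight in SCORES)
-- ===== Notes on version B (the rewrite author's own statement) =====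
-- stated objective: alternative
-- what changed: Replaces the single per-element accumulate-with-branches pass by per-key counting: for each of the four scoring letters, count its occurrences with list.count and sum weight*count (four staged scans, no per-element accumulator).
import Mathlib
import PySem

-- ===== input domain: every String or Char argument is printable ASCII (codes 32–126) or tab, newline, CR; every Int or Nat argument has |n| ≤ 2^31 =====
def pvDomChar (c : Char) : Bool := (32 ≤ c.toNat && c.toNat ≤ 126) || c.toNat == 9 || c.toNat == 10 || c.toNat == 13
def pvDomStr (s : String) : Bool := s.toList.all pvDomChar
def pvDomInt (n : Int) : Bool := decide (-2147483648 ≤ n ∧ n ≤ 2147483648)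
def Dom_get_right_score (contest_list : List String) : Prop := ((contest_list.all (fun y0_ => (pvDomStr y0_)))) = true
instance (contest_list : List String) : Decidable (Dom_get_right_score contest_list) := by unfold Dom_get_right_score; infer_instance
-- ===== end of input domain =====

-- B replaces A's fused per-element accumulate-with-branches pass by four per-key counting scans (weight * count per scoring letter); objective: alternative decomposition, same O(n) cost.

-- ===== PORT A =====
-- Port of A: single pass over the list accumulating with four independent if-branches.
def get_right_score (contest_list : List String) : Int :=
  contest_list.foldl (fun right_score letter =>
    let right_score := if letter == "m" then right_score + 4 else right_score
    let right_score := if letter == "q" then right_score + 3 else right_score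
    let right_score := if letter == "d" then right_score + 2 else right_score
    let right_score := if letter == "z" then right_score + 1 else right_score
    right_score) 0

-- ===== PORT B =====
-- Port of B: SCORES table; sum over it of weight * contest_list.count(letter).
def pvSCORES : List (String × Int) := [("m", 4), ("q", 3), ("d", 2), ("z", 1)]

def get_right_score_alt (contest_list : List String) : Int :=
  (pvSCORES.map (fun p => p.2 * (PySem.List.count contest_list p.1 : Int))).sum

-- ===== PRECONDITION & SPEC =====
def Spec_get_right_score (contest_list : List String) (out : Int) : Prop := out = get_right_score_alt contest_list
instance (contest_list : List String) (out : Int) : Decidable (Spec_get_right_score contest_list out) := by unfold Spec_get_right_score; infer_instance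

-- ===== CLAIM =====
def Claim_equal_get_right_score : Prop := ∀ (contest_list : List String), Dom_get_right_score contest_list → Spec_get_right_score contest_list (get_right_score contest_list)

-- ===== LEMMAS AND PROOFS =====
theorem fold_eq (l : List String) (a : Int) :
    l.foldl (fun right_score letter =>
      let right_score := if letter == "m" then right_score + 4 else right_score
      let right_score := if letter == "q" then right_score + 3 else right_score
      let right_score := if letter == "d" then right_score + 2 else right_score
      let right_score := if letter == "z" then right_score + 1 else right_score
      right_score) a
    = a + 4 * (l.count "m" : Int) + 3 * l.count "q" + 2 * l.count "d" + l.count "z" := by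
  induction l generalizing a with
  | nil => simp
  | cons x xs ih =>
    simp only [List.foldl_cons, List.count_cons, ih]
    split_ifs <;> push_cast <;> ring

-- ===== VERDICT =====
theorem get_right_score_spec : Claim_equal_get_right_score := by
  intro l _
  unfold Spec_get_right_score get_right_score get_right_score_alt pvSCORES
  simp only [List.map_cons, List.map_nil, List.sum_cons, List.sum_nil, PySem.List.count_eq, fold_eq]
  ring
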